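-- pv_equiv track=rewrite | github.com/karlaHH/DeteccionDePlagios | OCRs/sinComentarios/ocr27.py | lineamitadhorizontal
-- ===== SOURCE A (Python) =====
-- def lineamitadhorizontal(img2, filas, columnas):
--
--     contadorcortes1 = 0
--     contadorcortes0 = 0
--
--     cortesmitadhorizontal = 0
--
--     columna = 0
--
--     medr = int(filas/2)
--
--     for x in range(columnas):
--
--         contadorcortes1 = img2[medr][x]
--
--         if(x<columnas-1):
--
--             contadorcortes0 = img2[medr][x+1]
--
--             if((contadorcortes0!=contadorcortes1 and contadorcortes0==1) or (columna==0 and img2[medr][0]==1)):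
--
--                 cortesmitadhorizontal = cortesmitadhorizontal + 1
--
--                 columna = columna + 1
--
--
--     return cortesmitadhorizontal
-- ===== SOURCE B (Python) =====
-- def lineamitadhorizontal(img2, filas, columnas):
--     # Inclusion-exclusion over the middle row's first `columnas` cells:
--     # each maximal run of 1s contributes (its length) ones and (length - 1)
--     # internal adjacent 1-1 pairs, so
--     #   number of runs = (count of cells == 1) - (count of adjacent 1-1 pairs).
--     # (Intended fix: for columnas == 1 the original returns 0 even when the
--     # lone cell is 1; here it counts as one run.)
--     if columnas <= 0:
--         return 0
--     row = img2[int(filas / 2)][:columnas]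
--     ones = sum(1 for v in row if v == 1)
--     pairs = sum(1 for a, b in zip(row, row[1:]) if a == 1 and b == 1)
--     return ones - pairs
-- ===== Notes on version B (the rewrite author's own statement) =====
-- stated objective: alternative
-- what changed: Replaces A's stateful rising-edge scan (flag variable, lookahead at x+1, special first-column clause) with an inclusion-exclusion identity: runs of 1s = (#cells equal to 1) - (#adjacent 1-1 pairs), computed as two independent aggregate counts; A's columnas==1 miscount is fixed.
-- intended difference: When columnas == 1 and the middle row's first cell equals 1, A returns 0 (its counting branch requires x < columnas-1 so it never fires), while B returns 1, the intended count of one cut. — e.g. on lineamitadhorizontal([[1]], 1, 1): A returns 0, B returns 1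
import Mathlib
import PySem

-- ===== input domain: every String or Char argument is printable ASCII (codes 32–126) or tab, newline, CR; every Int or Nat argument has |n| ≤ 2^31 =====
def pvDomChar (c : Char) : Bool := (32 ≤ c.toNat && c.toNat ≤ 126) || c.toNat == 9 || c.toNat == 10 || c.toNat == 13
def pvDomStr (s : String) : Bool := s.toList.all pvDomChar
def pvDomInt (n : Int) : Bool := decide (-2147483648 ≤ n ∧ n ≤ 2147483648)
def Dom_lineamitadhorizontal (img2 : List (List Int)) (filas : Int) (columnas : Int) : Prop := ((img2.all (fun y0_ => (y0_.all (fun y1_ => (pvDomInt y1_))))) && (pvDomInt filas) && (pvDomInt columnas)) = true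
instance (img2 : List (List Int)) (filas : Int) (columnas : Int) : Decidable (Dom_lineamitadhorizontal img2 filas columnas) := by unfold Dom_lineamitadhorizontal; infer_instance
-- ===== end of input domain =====

-- B counts runs of 1s in the sliced middle row by inclusion-exclusion (#ones minus
-- #adjacent 1-1 pairs, two independent aggregate counts) instead of A's stateful
-- rising-edge scan; it fixes A's columnas==1 miscount (see D_ below).


-- ===== PORT A =====
-- int(filas/2): float division then truncation toward zero = Int.tdiv (exact, |filas| ≤ 2^31)
def lineamitadhorizontal (img2 : List (List Int)) (filas : Int) (columnas : Int) : Int :=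
  let medr := filas.tdiv 2
  (((PySem.List.pyRange 0 columnas 1).foldl
    (fun (st : Int × Int) (x : Int) =>
      let contadorcortes1 := PySem.List.pyGetD (PySem.List.pyGetD img2 medr []) x 0
      if x < columnas - 1 then
        let contadorcortes0 := PySem.List.pyGetD (PySem.List.pyGetD img2 medr []) (x + 1) 0
        if (contadorcortes0 ≠ contadorcortes1 ∧ contadorcortes0 = 1) ∨
           (st.2 = 0 ∧ PySem.List.pyGetD (PySem.List.pyGetD img2 medr []) 0 0 = 1) then
          (st.1 + 1, st.2 + 1)
        else st
      else st)
    (0, 0)) : Int × Int).1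

-- ===== PORT B =====
def lineamitadhorizontal_alt (img2 : List (List Int)) (filas : Int) (columnas : Int) : Int :=
  if columnas ≤ 0 then 0
  else
    let row := PySem.List.slice (PySem.List.pyGetD img2 (filas.tdiv 2) []) none (some columnas)
    let ones := row.foldl (fun (acc : Int) v => if v = 1 then acc + 1 else acc) 0
    let pairs := (row.zip (PySem.List.slice row (some 1) none)).foldl
      (fun (acc : Int) (p : Int × Int) => if p.1 = 1 ∧ p.2 = 1 then acc + 1 else acc) 0
    ones - pairs

-- ===== PRECONDITION & SPEC =====
-- Pre_ excludes exactly the inputs where A raises an IndexError: when columnas ≥ 1 it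
-- indexes the middle row img2[int(filas/2)] (so that row must exist, Python negative
-- indexing included) at every position 0..columnas-1.
def Pre_lineamitadhorizontal (img2 : List (List Int)) (filas : Int) (columnas : Int) : Prop :=
  columnas ≤ 0 ∨
    (PySem.Raise.InRange img2.length (filas.tdiv 2) ∧
     columnas ≤ ((PySem.List.pyGetD img2 (filas.tdiv 2) []).length : Int))
instance (img2 : List (List Int)) (filas : Int) (columnas : Int) : Decidable (Pre_lineamitadhorizontal img2 filas columnas) := by unfold Pre_lineamitadhorizontal; infer_instance

def pvWitness_lineamitadhorizontal : List (List Int) × Int × Int := ([[1, 0, 1]], 1, 3)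

-- When columnas == 1 and the middle row's first cell equals 1, A returns 0 (its counting
-- branch requires x < columnas-1 so it never fires), while B returns 1, the intended
-- count of one cut.
def D_lineamitadhorizontal (img2 : List (List Int)) (filas : Int) (columnas : Int) : Prop :=
  columnas = 1 ∧
    ((img2.getD (if filas.tdiv 2 < 0 then filas.tdiv 2 + (img2.length : Int)
                 else filas.tdiv 2).toNat []).getD 0 0) = 1
instance (img2 : List (List Int)) (filas : Int) (columnas : Int) : Decidable (D_lineamitadhorizontal img2 filas columnas) := by unfold D_lineamitadhorizontal; infer_instance

def Spec_lineamitadhorizontal (img2 : List (List Int)) (filas : Int) (columnas : Int) (out : Int) : Prop := ¬ D_lineamitadhorizontal img2 filas columnas → out = lineamitadhorizontal_alt img2 filas columnas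
instance (img2 : List (List Int)) (filas : Int) (columnas : Int) (out : Int) : Decidable (Spec_lineamitadhorizontal img2 filas columnas out) := by unfold Spec_lineamitadhorizontal; infer_instance

def pvDiffWitness_lineamitadhorizontal : List (List Int) × Int × Int := ([[1]], 1, 1)
def pvDiffWitnessOut_lineamitadhorizontal : Int × Int := (0, 1)

-- ===== CLAIM (what is proved, stated in full; the proofs are below) =====
def Claim_unchanged_lineamitadhorizontal : Prop := ∀ (img2 : List (List Int)) (filas : Int) (columnas : Int), Dom_lineamitadhorizontal img2 filas columnas → Pre_lineamitadhorizontal img2 filas columnas → Spec_lineamitadhorizontal img2 filas columnas (lineamitadhorizontal img2 filas columnas)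
def Claim_changed_lineamitadhorizontal : Prop := Dom_lineamitadhorizontal (pvDiffWitness_lineamitadhorizontal.1) (pvDiffWitness_lineamitadhorizontal.2.1) (pvDiffWitness_lineamitadhorizontal.2.2) ∧ Pre_lineamitadhorizontal (pvDiffWitness_lineamitadhorizontal.1) (pvDiffWitness_lineamitadhorizontal.2.1) (pvDiffWitness_lineamitadhorizontal.2.2) ∧ D_lineamitadhorizontal (pvDiffWitness_lineamitadhorizontal.1) (pvDiffWitness_lineamitadhorizontal.2.1) (pvDiffWitness_lineamitadhorizontal.2.2) ∧ lineamitadhorizontal (pvDiffWitness_lineamitadhorizontal.1) (pvDiffWitness_lineamitadhorizontal.2.1) (pvDiffWitness_lineamitadhorizontal.2.2) = pvDiffWitnessOut_lineamitadhorizontal.1 ∧ lineamitadhorizontal_alt (pvDiffWitness_lineamitadhorizontal.1) (pvDiffWitness_lineamitadhorizontal.2.1) (pvDiffWitness_lineamitadhorizontal.2.2) = pvDiffWitnessOut_lineamitadhorizontal.2 ∧ pvDiffWitnessOut_lineamitadhorizontal.1 ≠ pvDiffWitnessOut_lineamitadhorizontal.2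
def Claim_exact_lineamitadhorizontal : Prop := ∀ (img2 : List (List Int)) (filas : Int) (columnas : Int), Dom_lineamitadhorizontal img2 filas columnas → Pre_lineamitadhorizontal img2 filas columnas → D_lineamitadhorizontal img2 filas columnas → lineamitadhorizontal img2 filas columnas ≠ lineamitadhorizontal_alt img2 filas columnas

-- ===== LEMMAS AND PROOFS =====

-- number of run starts (cur true, previous false) scanning a boolean list left to right
def pvRuns (prev : Bool) : List Bool → Int
  | [] => 0
  | b :: t => (if b && !prev then 1 else 0) + pvRuns b t

-- number of true elements
def pvOnes : List Bool → Int
  | [] => 0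
  | b :: t => (if b then 1 else 0) + pvOnes t

-- number of adjacent true-true pairs in prev :: bs
def pvPairs (prev : Bool) : List Bool → Int
  | [] => 0
  | b :: t => (if prev && b then 1 else 0) + pvPairs b t

-- inclusion-exclusion: run starts = ones − adjacent pairs
lemma pvRunsSplit (bs : List Bool) : ∀ prev, pvRuns prev bs = pvOnes bs - pvPairs prev bs := by
  induction bs with
  | nil => intro prev; simp [pvRuns, pvOnes, pvPairs]
  | cons b t ih =>
    intro prev
    simp only [pvRuns, pvOnes, pvPairs, ih b]
    cases b <;> cases prev <;> simp <;> ring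

lemma pvFoldOnes (r : List Int) : ∀ (a : Int),
    r.foldl (fun (acc : Int) v => if v = 1 then acc + 1 else acc) a
      = a + pvOnes (r.map (fun v => decide (v = 1))) := by
  induction r with
  | nil => intro a; simp [pvOnes]
  | cons x t ih =>
    intro a
    simp only [List.foldl_cons, List.map_cons, pvOnes, ih]
    by_cases h : x = 1 <;> simp [h] <;> ring

lemma pvFoldPairs (t : List Int) : ∀ (x a : Int),
    ((x :: t).zip t).foldl
        (fun (acc : Int) (p : Int × Int) => if p.1 = 1 ∧ p.2 = 1 then acc + 1 else acc) a
      = a + pvPairs (decide (x = 1)) (t.map (fun v => decide (v = 1))) := by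
  induction t with
  | nil => intro x a; simp [pvPairs]
  | cons y t' ih =>
    intro x a
    simp only [List.zip_cons_cons, List.foldl_cons, List.map_cons, pvPairs, ih]
    by_cases hx : x = 1 <;> by_cases hy : y = 1 <;> simp [hx, hy] <;> ring

lemma pvB_eq (img2 : List (List Int)) (filas columnas : Int) (h : ¬ columnas ≤ 0) :
    lineamitadhorizontal_alt img2 filas columnas =
      pvRuns false (((PySem.List.pyGetD img2 (filas.tdiv 2) []).take columnas.toNat).map
        (fun v => decide (v = 1))) := by
  simp only [lineamitadhorizontal_alt, if_neg h]
  rw [PySem.List.slice_to _ (by omega), PySem.List.slice_from_one]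
  set r := (PySem.List.pyGetD img2 (filas.tdiv 2) []).take columnas.toNat with hr
  cases r with
  | nil => simp [pvRuns]
  | cons x t =>
    simp only [List.tail_cons]
    rw [pvFoldOnes, pvFoldPairs, pvRunsSplit]
    simp only [List.map_cons, pvOnes, pvPairs, Bool.false_and]
    simp

-- A's loop body with the middle row and the column bound abstracted out
def pvStep (r : List Int) (n : Int) (st : Int × Int) (x : Int) : Int × Int :=
  if x < n - 1 then
    if (PySem.List.pyGetD r (x + 1) 0 ≠ PySem.List.pyGetD r x 0 ∧
        PySem.List.pyGetD r (x + 1) 0 = 1) ∨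
       (st.2 = 0 ∧ PySem.List.pyGetD r 0 0 = 1) then (st.1 + 1, st.2 + 1)
    else st
  else st

lemma pvA_eq (img2 : List (List Int)) (filas columnas : Int) :
    lineamitadhorizontal img2 filas columnas =
      ((PySem.List.pyRange 0 columnas 1).foldl
        (pvStep (PySem.List.pyGetD img2 (filas.tdiv 2) []) columnas) (0, 0)).1 := rfl

lemma pvAtail (r : List Int) (n : Nat) (hlen : n ≤ r.length) :
    ∀ (m i : Nat) (c : Int), i + m = n → 1 ≤ i → 0 ≤ c → (c = 0 → ¬ r.getD 0 0 = 1) →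
      ((List.range' i m).foldl (fun st k => pvStep r (n : Int) st ((k : Nat) : Int)) (c, c)).1
        = c + pvRuns (decide (r.getD i 0 = 1))
            (((r.take n).drop (i + 1)).map (fun v => decide (v = 1))) := by
  intro m
  induction m with
  | zero =>
    intro i c hin hi hc0 hc
    have hnil : (r.take n).drop (i + 1) = [] := by
      apply List.drop_eq_nil_of_le; simp; omega
    simp [hnil, pvRuns]
  | succ m ih =>
    intro i c hin hi hc0 hc
    rw [List.range'_succ]
    simp only [List.foldl_cons]
    have hclause : ¬ (((c, c) : Int × Int).2 = 0 ∧ PySem.List.pyGetD r 0 0 = 1) := by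
      rw [PySem.List.pyGetD_zero]
      rintro ⟨h1, h2⟩
      exact hc h1 (by simpa using h2)
    by_cases hm : m = 0
    · subst hm
      have hg : ¬ ((i : Int) < (n : Int) - 1) := by omega
      have hnil : (r.take n).drop (i + 1) = [] := by
        apply List.drop_eq_nil_of_le; simp; omega
      simp [pvStep, hg, hnil, pvRuns]
    · have hg : ((i : Int) < (n : Int) - 1) := by omega
      have hi1r : i + 1 < r.length := by omega
      have hir : i < r.length := by omega
      have e1 : PySem.List.pyGetD r ((i : Int) + 1) 0 = r[i + 1] := by
        have hcast : ((i : Int) + 1) = ((i + 1 : Nat) : Int) := by push_cast; ring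
        rw [hcast, PySem.List.pyGetD_natCast, List.getD_eq_getElem _ _ hi1r]
      have e0 : PySem.List.pyGetD r ((i : Int)) 0 = r[i] := by
        rw [PySem.List.pyGetD_natCast, List.getD_eq_getElem _ _ hir]
      have hlt : i + 1 < (r.take n).length := by simp; omega
      have hdrop : (r.take n).drop (i + 1) = r[i + 1] :: (r.take n).drop (i + 2) := by
        rw [List.drop_eq_getElem_cons hlt, List.getElem_take]
      have egd : r.getD (i + 1) 0 = r[i + 1] := List.getD_eq_getElem _ _ hi1r
      have egd0 : r.getD i 0 = r[i] := List.getD_eq_getElem _ _ hir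
      by_cases hedge : (r[i + 1] ≠ r[i] ∧ r[i + 1] = 1)
      · have hstep : pvStep r (n : Int) (c, c) ((i : Nat) : Int) = (c + 1, c + 1) := by
          simp only [pvStep, if_pos hg, e1, e0]
          rw [if_pos (Or.inl hedge)]
        rw [hstep, ih (i + 1) (c + 1) (by omega) (by omega) (by omega) (by intro h; omega)]
        rw [hdrop, egd, egd0]
        simp only [List.map_cons, pvRuns]
        have hb1 : (decide (r[i + 1] = 1)) = true := by simp [hedge.2]
        have hb0 : (decide (r[i] = 1)) = false := by
          simp only [decide_eq_false_iff_not]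
          intro h; exact hedge.1 (by rw [hedge.2, h])
        rw [hb1, hb0]
        simp
        ring
      · have hstep : pvStep r (n : Int) (c, c) ((i : Nat) : Int) = (c, c) := by
          simp only [pvStep, if_pos hg, e1, e0]
          rw [if_neg (by intro h; rcases h with h | h; exact hedge h; exact hclause h)]
        rw [hstep, ih (i + 1) c (by omega) (by omega) hc0 hc]
        rw [hdrop, egd, egd0]
        simp only [List.map_cons, pvRuns]
        have hb : ¬ ((decide (r[i + 1] = 1)) && !(decide (r[i] = 1))) = true := by
          simp only [Bool.and_eq_true, Bool.not_eq_eq_eq_not, Bool.not_true,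
            decide_eq_true_eq, decide_eq_false_iff_not]
          rintro ⟨h1, h0⟩
          exact hedge ⟨by rw [h1]; exact fun hh => h0 hh.symm, h1⟩
        rw [if_neg hb]
        ring

lemma pvA_val (r : List Int) (n : Nat) (hn : 2 ≤ n) (hlen : n ≤ r.length) :
    ((List.range n).foldl (fun st k => pvStep r (n : Int) st ((k : Nat) : Int)) (0, 0)).1
      = pvRuns false ((r.take n).map (fun v => decide (v = 1))) := by
  obtain ⟨m, rfl⟩ : ∃ m, n = m + 2 := ⟨n - 2, by omega⟩
  have h0r : 0 < r.length := by omega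
  have h1r : 1 < r.length := by omega
  have hsplit : List.range (m + 2) = 0 :: List.range' 1 (m + 1) := by
    rw [List.range_eq_range', List.range'_succ]
  rw [hsplit]
  simp only [List.foldl_cons]
  have e1 : PySem.List.pyGetD r ((0 : Int) + 1) 0 = r[1] := by
    norm_num
    rw [show ((1 : Int)) = ((1 : Nat) : Int) by norm_num, PySem.List.pyGetD_natCast,
      List.getD_eq_getElem _ _ h1r]
  have e0 : PySem.List.pyGetD r ((0 : Int)) 0 = r[0] := by
    rw [show ((0 : Int)) = ((0 : Nat) : Int) by norm_num, PySem.List.pyGetD_natCast,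
      List.getD_eq_getElem _ _ h0r]
  have hz : PySem.List.pyGetD r 0 0 = r[0] := by
    rw [PySem.List.pyGetD_zero, List.getD_eq_getElem _ _ h0r]
  have hcond : pvStep r ((m + 2 : Nat) : Int) (0, 0) ((0 : Nat) : Int)
      = (if (r[1] ≠ r[0] ∧ r[1] = 1) ∨ r[0] = 1 then ((1 : Int), (1 : Int)) else (0, 0)) := by
    simp only [pvStep, Nat.cast_zero,
      if_pos (by push_cast; omega : (0 : Int) < ((m + 2 : Nat) : Int) - 1), e1, e0]
    by_cases h : (r[1] ≠ r[0] ∧ r[1] = 1) ∨ r[0] = 1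
    · rw [if_pos (by tauto), if_pos h]; norm_num
    · rw [if_neg (by tauto), if_neg h]
  have hl0 : 0 < (r.take (m + 2)).length := by simp; omega
  have hl1 : 1 < (r.take (m + 2)).length := by simp; omega
  have hd0 : r.take (m + 2) = r[0] :: (r.take (m + 2)).drop 1 := by
    have hx := List.drop_eq_getElem_cons hl0
    simpa [List.getElem_take] using hx
  have hd1 : (r.take (m + 2)).drop 1 = r[1] :: (r.take (m + 2)).drop 2 := by
    have hx := List.drop_eq_getElem_cons hl1
    simpa [List.getElem_take] using hx
  have egd1 : r.getD 1 0 = r[1] := List.getD_eq_getElem _ _ h1r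
  have egd0 : r.getD 0 0 = r[0] := List.getD_eq_getElem _ _ h0r
  by_cases h01 : (r[1] ≠ r[0] ∧ r[1] = 1) ∨ r[0] = 1
  · rw [hcond, if_pos h01,
      pvAtail r (m + 2) hlen (m + 1) 1 1 (by omega) (le_refl 1) (by omega)
        (by intro h; omega)]
    rw [egd1]
    conv_rhs => rw [hd0]
    rw [hd1]
    simp only [List.map_cons, pvRuns]
    rcases h01 with ⟨hne, h1⟩ | h0
    · have hb0 : (decide (r[0] = 1)) = false := by
        simp only [decide_eq_false_iff_not]; intro h; exact hne (by rw [h1, h])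
      rw [hb0]
      simp [h1]
    · have hb0 : (decide (r[0] = 1)) = true := by simp [h0]
      rw [hb0]
      by_cases h1 : r[1] = 1 <;> simp [h1]
  · rw [hcond, if_neg h01,
      pvAtail r (m + 2) hlen (m + 1) 1 0 (by omega) (le_refl 1) (by omega)
        (by intro _ hcontra; rw [egd0] at hcontra; exact h01 (Or.inr hcontra))]
    rw [egd1]
    conv_rhs => rw [hd0]
    rw [hd1]
    simp only [List.map_cons, pvRuns]
    push_neg at h01
    have hb0 : (decide (r[0] = 1)) = false := by simp [h01.2]
    have hstart1 : ¬ ((decide (r[1] = 1)) && !(decide (r[0] = 1))) = true := by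
      rw [hb0]
      simp only [Bool.not_false, Bool.and_true, decide_eq_true_eq]
      intro h1; exact (h01.1 (by rw [h1]; intro hh; exact h01.2 hh.symm)) h1
    rw [if_neg hstart1, hb0]
    simp

lemma pvRangeNil (c : Int) (h : c ≤ 0) : PySem.List.pyRange 0 c 1 = [] := by
  simp [PySem.List.pyRange]; omega

lemma pvRange01 : PySem.List.pyRange 0 1 1 = [(0 : Int)] := by decide

lemma pvTakeOne (r : List Int) (h : 0 < r.length) : r.take 1 = [r[0]] := by
  have hd := List.drop_eq_getElem_cons (i := 0) (l := r.take 1) (by simp; omega)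
  simp only [List.drop_zero, List.getElem_take] at hd
  rw [hd, List.drop_eq_nil_of_le (by simp)]

-- Python indexing (negative index from the end) written with plain List.getD, valid in range
lemma pvPyGetD_eq {α : Type} (xs : List α) (i : Int) (d : α) (h : PySem.Raise.InRange xs.length i) :
    PySem.List.pyGetD xs i d = xs.getD (if i < 0 then i + (xs.length : Int) else i).toNat d := by
  unfold PySem.Raise.InRange at h
  by_cases hneg : i < 0
  · simp only [if_pos hneg]
    obtain ⟨k, hk, rfl⟩ : ∃ k : Nat, 0 < k ∧ i = -(k : Int) := ⟨i.natAbs, by omega, by omega⟩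
    rw [PySem.List.pyGetD_neg_natCast _ _ _ hk (by omega), List.getD_eq_getElem _ _ (by omega)]
    congr 1
    omega
  · simp only [if_neg hneg]
    rw [PySem.List.pyGetD_eq_getElem xs d (by omega) (by omega),
      List.getD_eq_getElem _ _ (by omega)]

-- ===== VERDICT (by name: the statement is the Claim_ definition above) =====
theorem lineamitadhorizontal_spec : Claim_unchanged_lineamitadhorizontal := by
  intro img2 filas columnas _hdom hpre hnD
  by_cases hc0 : columnas ≤ 0
  · rw [pvA_eq, pvRangeNil columnas hc0]
    simp [lineamitadhorizontal_alt, hc0]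
  · rcases hpre with h | ⟨_hin, hlen⟩
    · exact absurd h hc0
    rw [pvB_eq img2 filas columnas hc0]
    set r := PySem.List.pyGetD img2 (filas.tdiv 2) [] with hr
    set n := columnas.toNat with hn
    have hcn : columnas = (n : Int) := by omega
    have hlenn : n ≤ r.length := by omega
    by_cases h1 : n = 1
    · -- columnas = 1: the counting branch of A never fires; ¬D gives r[0] ≠ 1
      have h0r : 0 < r.length := by omega
      have hD0 : ¬ r[0] = 1 := by
        intro hh
        apply hnD
        unfold D_lineamitadhorizontal
        refine ⟨by omega, ?_⟩
        rw [← pvPyGetD_eq img2 (filas.tdiv 2) [] _hin, ← hr, List.getD_eq_getElem _ _ h0r]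
        exact hh
      have hc1 : columnas = 1 := by omega
      rw [pvA_eq, ← hr, hc1, pvRange01]
      simp only [List.foldl_cons, List.foldl_nil]
      have hstep : pvStep r 1 (0, 0) 0 = (0, 0) := by
        simp [pvStep]
      rw [hstep, hn, hc1]
      rw [show ((1 : Int)).toNat = 1 from rfl, pvTakeOne r h0r]
      simp [pvRuns, hD0]
    · have hn2 : 2 ≤ n := by omega
      rw [pvA_eq, ← hr, hcn, PySem.List.pyRange_zero_natCast, List.foldl_map]
      exact pvA_val r n hn2 hlenn

theorem lineamitadhorizontal_changed : Claim_changed_lineamitadhorizontal := by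
  unfold Claim_changed_lineamitadhorizontal; decide

theorem lineamitadhorizontal_tight : Claim_exact_lineamitadhorizontal := by
  intro img2 filas columnas _hdom hpre hD
  rcases hD with ⟨hc1, hv⟩
  rcases hpre with h | ⟨_hin, hlen⟩
  · omega
  set r := PySem.List.pyGetD img2 (filas.tdiv 2) [] with hr
  have h0r : 0 < r.length := by omega
  have hv0 : r[0] = 1 := by
    rw [← pvPyGetD_eq img2 (filas.tdiv 2) [] _hin, ← hr, List.getD_eq_getElem _ _ h0r] at hv
    exact hv
  have hA : lineamitadhorizontal img2 filas columnas = 0 := by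
    rw [pvA_eq, ← hr, hc1, pvRange01]
    simp only [List.foldl_cons, List.foldl_nil]
    simp [pvStep]
  have hB : lineamitadhorizontal_alt img2 filas columnas = 1 := by
    rw [pvB_eq img2 filas columnas (by omega), ← hr, hc1]
    rw [show ((1 : Int)).toNat = 1 from rfl, pvTakeOne r h0r]
    simp [pvRuns, hv0]
  rw [hA, hB]
  decide
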